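-- pv_equiv track=rewrite | github.com/teamshortcut/PMNG-Cipher | cipher.py | encryptDoubleChars
-- ===== SOURCE A (Python) =====
-- def encryptDoubleChars(plaintext):
-- 	index = 0
-- 	while index < len(plaintext) - 1:
-- 		if plaintext[index] == plaintext[index+1]:
-- 			plaintext = plaintext[:index] + "D" + plaintext[index+1:]
-- 			index += 1
-- 		index += 1
--
-- 	return plaintext
-- ===== SOURCE B (Python) =====
-- def encryptDoubleChars(plaintext):
-- 	out = []
-- 	i = 0
-- 	n = len(plaintext)
-- 	while i < n:
-- 		if i + 1 < n and plaintext[i] == plaintext[i+1]: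
-- 			out.append("D")
-- 			out.append(plaintext[i+1])
-- 			i += 2
-- 		else:
-- 			out.append(plaintext[i])
-- 			i += 1
-- 	return "".join(out)
-- ===== Notes on version B (the rewrite author's own statement) =====
-- stated objective: faster
-- what changed: A repeatedly rebuilds the whole string by slicing on every matched pair (quadratic); B makes one forward pass emitting output characters, consuming two characters on a match and one otherwise.
import Mathlib
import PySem

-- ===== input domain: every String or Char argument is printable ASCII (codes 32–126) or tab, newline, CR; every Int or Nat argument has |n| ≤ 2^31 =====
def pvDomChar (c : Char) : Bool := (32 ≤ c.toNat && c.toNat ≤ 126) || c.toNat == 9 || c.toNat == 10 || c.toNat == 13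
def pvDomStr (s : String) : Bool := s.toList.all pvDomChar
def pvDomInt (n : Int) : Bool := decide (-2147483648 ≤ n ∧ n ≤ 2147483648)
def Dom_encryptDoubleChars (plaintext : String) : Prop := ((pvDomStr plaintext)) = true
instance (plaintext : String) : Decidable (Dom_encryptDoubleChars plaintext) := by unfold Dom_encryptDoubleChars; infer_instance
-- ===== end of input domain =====

-- B replaces A's quadratic rebuild-the-string-by-slicing loop with a single forward pass
-- that emits output chars as it goes (objective: faster, asymptotic O(n^2) -> O(n)).

-- ===== PORT A =====
-- A's while-loop: index walks the (repeatedly rebuilt) string; on a match the string is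
-- rebuilt as plaintext[:index] + "D" + plaintext[index+1:] and index advances by 2.
-- (fuel = the string's length bounds the iteration count; the rebuilt string keeps its length,
-- and the index grows every iteration, so the fuel is never exhausted while the guard holds)
def encryptDoubleCharsLoop (fuel : Nat) (s : List Char) (i : Nat) : List Char :=
  match fuel with
  | 0 => s
  | fuel + 1 =>
    if h : i + 1 < s.length then
      if s[i] = s[i+1] then
        encryptDoubleCharsLoop fuel (s.take i ++ 'D' :: s.drop (i+1)) (i+2)
      else
        encryptDoubleCharsLoop fuel s (i+1)
    else s

def encryptDoubleChars (plaintext : String) : String :=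
  String.ofList (encryptDoubleCharsLoop plaintext.toList.length plaintext.toList 0)

-- ===== PORT B =====
-- B's single pass: consume two chars on a match (emitting 'D' and the second char), else one.
def encryptDoubleCharsPass : List Char → List Char
  | [] => []
  | [a] => [a]
  | a :: b :: rest =>
    if a = b then 'D' :: b :: encryptDoubleCharsPass rest
    else a :: encryptDoubleCharsPass (b :: rest)

def encryptDoubleChars_alt (plaintext : String) : String :=
  String.ofList (encryptDoubleCharsPass plaintext.toList)

-- ===== PRECONDITION & SPEC =====
def Spec_encryptDoubleChars (plaintext : String) (out : String) : Prop := out = encryptDoubleChars_alt plaintext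
instance (plaintext : String) (out : String) : Decidable (Spec_encryptDoubleChars plaintext out) := by unfold Spec_encryptDoubleChars; infer_instance

-- ===== CLAIM (what is proved, stated in full; the proofs are below) =====
def Claim_equal_encryptDoubleChars : Prop := ∀ (plaintext : String), Dom_encryptDoubleChars plaintext → Spec_encryptDoubleChars plaintext (encryptDoubleChars plaintext)

-- ===== LEMMAS AND PROOFS =====

-- the single pass is the identity on lists of length ≤ 1
lemma encryptDoubleCharsPass_short (l : List Char) (hl : l.length ≤ 1) :
    encryptDoubleCharsPass l = l := by
  match l with
  | [] => rfl
  | [a] => rfl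
  | a :: b :: t => simp at hl

-- loop invariant: with enough fuel, the untouched suffix from i is what the single pass still has to process
lemma encryptDoubleCharsLoop_eq (fuel : Nat) (s : List Char) (i : Nat)
    (hf : s.length ≤ i + fuel) :
    encryptDoubleCharsLoop fuel s i = s.take i ++ encryptDoubleCharsPass (s.drop i) := by
  induction fuel generalizing s i with
  | zero =>
    have hle : s.length ≤ i := by omega
    rw [encryptDoubleCharsLoop, List.take_of_length_le hle, List.drop_of_length_le hle,
      encryptDoubleCharsPass]
    simp
  | succ fuel ih =>
    rw [encryptDoubleCharsLoop]
    by_cases h : i + 1 < s.length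
    · rw [dif_pos h]
      have hi : i < s.length := by omega
      have hlen : (List.take i s).length = i := by
        simp [Nat.min_eq_left (le_of_lt hi)]
      by_cases heq : s[i] = s[i+1]
      · rw [if_pos heq]
        rw [ih (s.take i ++ 'D' :: s.drop (i+1)) (i+2)
          (by simp; omega)]
        have hdrop : s.drop i = s[i] :: s[i+1] :: s.drop (i+2) := by
          rw [List.drop_eq_getElem_cons hi, List.drop_eq_getElem_cons h]
        rw [hdrop, encryptDoubleCharsPass, if_pos heq]
        have htk : (s.take i ++ 'D' :: s.drop (i+1)).take (i+2)
            = s.take i ++ ['D', s[i+1]] := by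
          rw [List.take_append, hlen]
          have h2 : i + 2 - i = 2 := by omega
          rw [h2, List.take_succ_cons, List.drop_eq_getElem_cons h, List.take_succ_cons,
            List.take_zero]
          simp [Nat.min_eq_left (le_of_lt hi)]
        have hdr : (s.take i ++ 'D' :: s.drop (i+1)).drop (i+2) = s.drop (i+2) := by
          rw [List.drop_append, hlen]
          have h3 : i + 2 - i = 2 := by omega
          rw [h3, List.drop_succ_cons, List.drop_drop]
          have h4 : (List.take i s).length ≤ i + 2 := by rw [hlen]; omega
          simp [List.drop_eq_nil_of_le h4]
        rw [htk, hdr]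
        simp
      · rw [if_neg heq, ih s (i+1) (by omega)]
        have hdrop1 : s.drop (i+1) = s[i+1] :: s.drop (i+2) := List.drop_eq_getElem_cons h
        rw [List.drop_eq_getElem_cons hi, hdrop1, encryptDoubleCharsPass, if_neg heq,
          ← hdrop1]
        have htk : s.take (i+1) = s.take i ++ [s[i]] := by
          rw [List.take_add_one, List.getElem?_eq_getElem hi]; rfl
        rw [htk]
        simp only [List.append_assoc, List.singleton_append]
    · rw [dif_neg h]
      have hl : (s.drop i).length ≤ 1 := by simp; omega
      rw [encryptDoubleCharsPass_short _ hl, List.take_append_drop]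

-- ===== VERDICT (by name: the statement is the Claim_ definition above) =====
theorem encryptDoubleChars_spec : Claim_equal_encryptDoubleChars := by
  intro p _
  unfold Spec_encryptDoubleChars encryptDoubleChars encryptDoubleChars_alt
  rw [encryptDoubleCharsLoop_eq _ _ _ (by omega)]
  simp
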